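-- pv_equiv track=rewrite | github.com/wsong5077/Markov-Text-Generation | markov.py | markov_model
-- ===== SOURCE A (Python) =====
-- def dollarify(wordList, k):
--     """This function embeds k of special $ delimiters in the list of words
--        Input: A list of words and a positive integer k corresponding to the number of $ delimiter.
--        Output: A list of words with special $ delimiters embedded"""
--     L=['$']*k
--     for i in range(len(wordList)):
--         if len(wordList[i])!=1:
--             if i==len(wordList)-1:
--                 L=L+[wordList[i]]
--                 break
--             else: L=L+[wordList[i]]+['$']*k
--         else:
--             L=L+[wordList[i]]
--     return L
--
-- def markov_model(wordList,k):
--     """This function builds an nth order Markov model for a given list of words.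
--        Input:  A list of words and a positive integer n corresponding to the order of the Markov model.
--        Output:  A dictionary in which the keys are n-tuples of words and/or dollar signs and the value associated
--        with each key is the list of words that follow that n-tuple."""
--     D={}
--     M=dollarify(wordList,k)
--     for i in range(len(M)-k):
--         K=[]
--         for j in range(i,i+k):
--             K.append(M[j])
--         a=0
--         for element in K:
--             if len(element)==1:
--                 a+=0
--             else: a+=1
--         if a!=0: pass
--         else:
--             if k==1:
--                 if (M[i],) in D: D[(M[i],)].append(M[i+1])
--                 else: D[(M[i],)]=[M[i+1]]
--             else:
--                 if tuple(K) in D: D[tuple(K)].append(M[i+k])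
--                 else: D[tuple(K)]=[M[i+k]]
--     return D
-- ===== SOURCE B (Python) =====
-- def markov_model(wordList, k):
--     # Build the delimited list in one linear pass (no quadratic list re-concatenation),
--     # then slide a window keeping an incremental count of multi-char elements, so each
--     # window costs O(1) except when a key is actually emitted.
--     M = ['$'] * k
--     last = len(wordList) - 1
--     for i, w in enumerate(wordList):
--         M.append(w)
--         if len(w) != 1 and i != last:
--             M += ['$'] * k
--     D = {}
--     bad = 0
--     for w in M[:k]:
--         if len(w) != 1:
--             bad += 1
--     for i in range(len(M) - k):
--         if bad == 0:
--             key = tuple(M[i:i + k])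
--             if key in D:
--                 D[key].append(M[i + k])
--             else:
--                 D[key] = [M[i + k]]
--         bad += (len(M[i + k]) != 1) - (len(M[i]) != 1)
--     return D
-- ===== Notes on version B (the rewrite author's own statement) =====
-- stated objective: faster
-- what changed: B builds the $-delimited list in one linear pass (A's dollarify re-concatenates the whole list each step) and replaces A's per-position inner loops (rebuilding and re-counting the k-window for every i) by a sliding window that maintains the count of multi-char elements incrementally, constructing the key tuple only when that count is 0.
-- outside the precondition, e.g. on markov_model(['ab', 'x'], -1): A returns {(): ['x', 'ab', 'x']}, B raises IndexError; on markov_model(['a', 'b'], -1): A returns {(): ['b', 'a', 'b']}, B raises IndexError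
import Mathlib
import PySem

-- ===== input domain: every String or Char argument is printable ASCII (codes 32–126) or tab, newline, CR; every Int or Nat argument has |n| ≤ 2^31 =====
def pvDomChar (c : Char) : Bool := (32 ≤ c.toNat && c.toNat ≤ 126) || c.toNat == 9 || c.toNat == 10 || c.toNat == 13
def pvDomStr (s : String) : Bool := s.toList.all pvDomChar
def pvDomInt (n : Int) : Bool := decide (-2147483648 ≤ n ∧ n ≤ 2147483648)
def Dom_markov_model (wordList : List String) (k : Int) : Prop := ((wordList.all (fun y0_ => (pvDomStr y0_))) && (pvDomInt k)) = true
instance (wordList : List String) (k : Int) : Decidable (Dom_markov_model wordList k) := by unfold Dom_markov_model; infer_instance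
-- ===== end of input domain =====

-- B replaces A's quadratic list re-concatenation and A's per-position window rebuild/recount
-- by a linear build plus a sliding incremental count (objective: faster).

-- ===== PORT A =====
-- both Pythons' dict update: `if key in D: D[key].append(v) else: D[key] = [v]`
def pvDictApp (D : PySem.Dict (List String) (List String)) (key : List String) (v : String) :
    PySem.Dict (List String) (List String) :=
  if D.contains key then D.insert key (D.getD key [] ++ [v]) else D.insert key [v]

-- literal port of dollarify: the indexed for-loop with `break` becomes bounded recursion on i
def pvDollarify_go (wordList : List String) (k : Int) (i : Nat) (L : List String) : List String :=
  if h : i < wordList.length then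
    let w := wordList[i]
    if PySem.Str.len w ≠ 1 then
      if i = wordList.length - 1 then L ++ [w]
      else pvDollarify_go wordList k (i + 1) (L ++ [w] ++ List.replicate k.toNat "$")
    else pvDollarify_go wordList k (i + 1) (L ++ [w])
  else L
termination_by wordList.length - i

def pvDollarify (wordList : List String) (k : Int) : List String :=
  pvDollarify_go wordList k 0 (List.replicate k.toNat "$")

-- the body of A's main loop, one iteration at index i
def pvStepA (M : List String) (k : Int) (D : PySem.Dict (List String) (List String)) (i : Int) :
    PySem.Dict (List String) (List String) :=
  let K := (PySem.List.pyRange i (i + k) 1).foldl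
    (fun Kacc j => Kacc ++ [PySem.List.pyGetD M j ""]) []
  let a := K.foldl (fun a e => if PySem.Str.len e = 1 then a + 0 else a + 1) (0 : Int)
  if a ≠ 0 then D
  else if k = 1 then
    pvDictApp D [PySem.List.pyGetD M i ""] (PySem.List.pyGetD M (i + 1) "")
  else
    pvDictApp D K (PySem.List.pyGetD M (i + k) "")

def markov_model (wordList : List String) (k : Int) : List (List String × List String) :=
  let M := pvDollarify wordList k
  ((PySem.List.pyRange 0 ((M.length : Int) - k) 1).foldl (pvStepA M k) PySem.Dict.empty).items

-- ===== PORT B =====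
-- the body of B's M-building loop: append the word; after a multi-char word (except the last) add k '$'s
def pvStepM (k : Int) (last : Int) (M : List String) (p : Int × String) : List String :=
  let M1 := M ++ [p.2]
  if PySem.Str.len p.2 ≠ 1 ∧ p.1 ≠ last then M1 ++ List.replicate k.toNat "$" else M1

def pvBuildM (wordList : List String) (k : Int) : List String :=
  (PySem.List.enumerate wordList 0).foldl (pvStepM k ((wordList.length : Int) - 1))
    (List.replicate k.toNat "$")

-- the body of B's sliding-window loop: state = (count of multi-char words in M[i:i+k], dict)
def pvStepB (M : List String) (k : Int) (s : Int × PySem.Dict (List String) (List String)) (i : Int) :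
    Int × PySem.Dict (List String) (List String) :=
  let D := if s.1 = 0 then
      pvDictApp s.2 (PySem.List.slice M (some i) (some (i + k))) (PySem.List.pyGetD M (i + k) "")
    else s.2
  (s.1 + (if PySem.Str.len (PySem.List.pyGetD M (i + k) "") ≠ 1 then 1 else 0)
       - (if PySem.Str.len (PySem.List.pyGetD M i "") ≠ 1 then 1 else 0), D)

def markov_model_alt (wordList : List String) (k : Int) : List (List String × List String) :=
  let M := pvBuildM wordList k
  let bad0 := (PySem.List.slice M none (some k)).foldl
    (fun b w => if PySem.Str.len w ≠ 1 then b + 1 else b) (0 : Int)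
  ((PySem.List.pyRange 0 ((M.length : Int) - k) 1).foldl (pvStepB M k)
    (bad0, PySem.Dict.empty)).2.items

-- ===== PRECONDITION & SPEC =====
-- Pre_ excludes negative k (the function is documented for positive k): there A reads M[i+k]
-- through negative-index wraparound (when it does not raise IndexError), and B itself raises.
def Pre_markov_model (wordList : List String) (k : Int) : Prop := 0 ≤ k
instance (wordList : List String) (k : Int) : Decidable (Pre_markov_model wordList k) := by
  unfold Pre_markov_model; infer_instance
def pvWitness_markov_model : List String × Int := (["ab", "c", "$", "de"], 2)
def Spec_markov_model (wordList : List String) (k : Int) (out : List (List String × List String)) : Prop := out = markov_model_alt wordList k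
instance (wordList : List String) (k : Int) (out : List (List String × List String)) : Decidable (Spec_markov_model wordList k out) := by unfold Spec_markov_model; infer_instance

-- ===== CLAIM (what is proved, stated in full; the proofs are below) =====
def Claim_equal_markov_model : Prop := ∀ (wordList : List String) (k : Int), Dom_markov_model wordList k → Pre_markov_model wordList k → Spec_markov_model wordList k (markov_model wordList k)

-- ===== LEMMAS AND PROOFS =====

-- "is a multi-character word" predicate and the count of such words in a prefix of M
def pvBadP (w : String) : Bool := decide (PySem.Str.len w ≠ 1)
def pvC (M : List String) (m : Nat) : Int := ((M.take m).countP pvBadP : Int)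

-- A's dollarify equals B's one-pass build (generalized over the start index / accumulator)
theorem pvDollarify_go_eq (wl : List String) (k : Int) :
    ∀ (c i : Nat) (L : List String), wl.length - i = c →
      pvDollarify_go wl k i L =
        (PySem.List.enumerate (wl.drop i) (i : Int)).foldl
          (pvStepM k ((wl.length : Int) - 1)) L := by
  intro c
  induction c with
  | zero =>
    intro i L h
    have hi : wl.length ≤ i := by omega
    rw [pvDollarify_go]
    rw [List.drop_eq_nil_of_le hi]
    simp [PySem.List.enumerate_nil, Nat.not_lt.2 hi]
  | succ c ih =>
    intro i L h
    have hi : i < wl.length := by omega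
    rw [pvDollarify_go, dif_pos hi]
    rw [List.drop_eq_getElem_cons hi, PySem.List.enumerate_cons, List.foldl_cons]
    have hcast : (i : Int) + 1 = ((i + 1 : Nat) : Int) := by push_cast; ring
    by_cases h1 : PySem.Str.len wl[i] = 1
    · -- single-char word: both just append it
      have h1' : wl[i].length = 1 := by
        rw [PySem.Str.len_eq] at h1; exact_mod_cast h1
      rw [if_neg (by simpa using h1)]
      rw [ih (i + 1) (L ++ [wl[i]]) (by omega)]
      unfold pvStepM
      rw [if_neg (by simp [h1'])]
      rw [hcast]
    · by_cases h2 : i = wl.length - 1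
      · -- last word, multi-char: A breaks; B's fold has nothing left to do
        rw [if_pos h1, if_pos h2]
        have hdrop : wl.drop (i + 1) = [] := List.drop_eq_nil_of_le (by omega)
        rw [hdrop, PySem.List.enumerate_nil, List.foldl_nil]
        unfold pvStepM
        rw [if_neg (by simp; intro _; omega)]
      · rw [if_pos h1, if_neg h2]
        rw [ih (i + 1) (L ++ [wl[i]] ++ List.replicate k.toNat "$") (by omega)]
        unfold pvStepM
        rw [if_pos (And.intro h1 (fun hc => h2 (by
          have hc' : (i : Int) = (wl.length : Int) - 1 := hc
          omega)))]
        rw [hcast]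

theorem pvM_eq (wordList : List String) (k : Int) : pvDollarify wordList k = pvBuildM wordList k := by
  unfold pvDollarify pvBuildM
  have := pvDollarify_go_eq wordList k wordList.length 0 (List.replicate k.toNat "$") (by omega)
  simpa using this

-- A's per-window count fold is a countP
theorem pvCountA (K : List String) : ∀ a0 : Int,
    K.foldl (fun a e => if PySem.Str.len e = 1 then a + 0 else a + 1) a0
      = a0 + (K.countP pvBadP : Int) := by
  induction K with
  | nil => intro a0; simp
  | cons x xs ih =>
    intro a0
    rw [List.foldl_cons, ih, List.countP_cons]
    simp only [pvBadP, decide_eq_true_eq]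
    split_ifs with h1 h2
    · exact absurd h1 h2
    · push_cast; ring
    · push_cast; ring

-- B's initial count fold is a countP
theorem pvCountB (l : List String) : ∀ b0 : Int,
    l.foldl (fun b w => if PySem.Str.len w ≠ 1 then b + 1 else b) b0
      = b0 + (l.countP pvBadP : Int) := by
  induction l with
  | nil => intro b0; simp
  | cons x xs ih =>
    intro b0
    rw [List.foldl_cons, ih, List.countP_cons]
    simp only [pvBadP, decide_eq_true_eq]
    split_ifs with h1 <;> push_cast <;> ring

-- one step of the prefix count
theorem pvC_succ (M : List String) (m : Nat) (h : m < M.length) :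
    pvC M (m + 1) = pvC M m + (if pvBadP M[m] then 1 else 0) := by
  unfold pvC
  rw [List.take_add_one, List.countP_append]
  have h2 : M[m]? = some M[m] := List.getElem?_eq_getElem h
  rw [h2]
  by_cases hb : pvBadP M[m] <;> simp [hb]

-- window count as a difference of prefix counts
theorem pvWinC (M : List String) (j n : Nat) :
    (((M.drop j).take n).countP pvBadP : Int) = pvC M (j + n) - pvC M j := by
  unfold pvC
  rw [List.take_add, List.countP_append]
  push_cast
  ring

-- A's inner K-building loop produces the window M[i:i+k]
theorem pvK_eq (M : List String) (j n : Nat) (h : j + n ≤ M.length) :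
    (PySem.List.pyRange (j : Int) ((j : Int) + (n : Int)) 1).foldl
      (fun Kacc jj => Kacc ++ [PySem.List.pyGetD M jj ""]) []
      = (M.drop j).take n := by
  rw [PySem.List.foldl_append_singleton_eq_map]
  rw [PySem.List.pyRange_one]
  have h1 : ((j : Int) + (n : Int) - (j : Int)).toNat = n := by omega
  rw [h1, List.map_map]
  apply List.ext_getElem
  · simp only [List.nil_append, List.length_map, List.length_range, List.length_take,
      List.length_drop]
    omega
  · intro t ht1 ht2
    simp only [List.nil_append, List.getElem_map, List.getElem_range, Function.comp_apply]
    have : ((j : Int) + (t : Int)) = ((j + t : Nat) : Int) := by push_cast; ring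
    rw [this, PySem.List.pyGetD_natCast]
    rw [List.getElem_take, List.getElem_drop]
    have hlt : j + t < M.length := by
      simp only [List.length_take, List.length_drop] at ht2; omega
    rw [List.getD_eq_getElem _ _ hlt]

theorem pvWin_getD (M : List String) (k : Int) (hk : 0 ≤ k) (i : Nat) :
    PySem.List.pyGetD M ((i : Int) + k) "" = M.getD (i + k.toNat) "" := by
  have : (i : Int) + k = ((i + k.toNat : Nat) : Int) := by push_cast; omega
  rw [this, PySem.List.pyGetD_natCast]

-- one iteration of A's main loop, written against the sliding-count invariant
theorem pvStepA_eq (M : List String) (k : Int) (hk : 0 ≤ k) (i : Nat)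
    (hib : (i : Int) < (M.length : Int) - k)
    (D : PySem.Dict (List String) (List String)) :
    pvStepA M k D ↑i =
      if pvC M (i + k.toNat) - pvC M i = 0 then
        pvDictApp D ((M.drop i).take k.toNat) (PySem.List.pyGetD M ((i : Int) + k) "")
      else D := by
  have hle : i + k.toNat ≤ M.length := by omega
  have hK : (PySem.List.pyRange (i : Int) ((i : Int) + k) 1).foldl
      (fun Kacc j => Kacc ++ [PySem.List.pyGetD M j ""]) [] = (M.drop i).take k.toNat := by
    rw [show (i : Int) + k = (i : Int) + ((k.toNat : Nat) : Int) by omega]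
    exact pvK_eq M i k.toNat hle
  simp only [pvStepA]
  rw [hK, pvCountA, pvWinC M i k.toNat]
  by_cases hb : pvC M (i + k.toNat) - pvC M i = 0
  · rw [if_pos hb, if_neg (by omega)]
    by_cases h1 : k = 1
    · rw [if_pos h1]
      have hwin : (M.drop i).take k.toNat = [PySem.List.pyGetD M (i : Int) ""] := by
        have hi : i < M.length := by omega
        have hd : M.drop i = M[i] :: M.drop (i + 1) := List.drop_eq_getElem_cons hi
        rw [h1, PySem.List.pyGetD_natCast, List.getD_eq_getElem M "" hi]
        rw [hd]
        rfl
      rw [hwin, h1]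
    · rw [if_neg h1]
  · rw [if_neg hb, if_pos (by omega)]

-- one iteration of B's main loop
theorem pvStepB_eq (M : List String) (k : Int) (hk : 0 ≤ k) (i : Nat)
    (b : Int) (D : PySem.Dict (List String) (List String)) :
    pvStepB M k (b, D) ↑i =
      (b + (if pvBadP (M.getD (i + k.toNat) "") then 1 else 0)
         - (if pvBadP (M.getD i "") then 1 else 0),
       if b = 0 then
         pvDictApp D ((M.drop i).take k.toNat) (PySem.List.pyGetD M ((i : Int) + k) "")
       else D) := by
  have hslice : PySem.List.slice M (some (i : Int)) (some ((i : Int) + k)) = (M.drop i).take k.toNat := by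
    rw [show (i : Int) + k = (i : Int) + ((k.toNat : Nat) : Int) by omega]
    exact PySem.List.slice_natCast_add M i k.toNat
  simp only [pvStepB]
  rw [hslice, pvWin_getD M k hk i]
  rw [PySem.List.pyGetD_natCast M i ""]
  simp only [pvBadP]
  congr 1
  by_cases h1 : PySem.Str.len (M.getD (i + k.toNat) "") = 1 <;>
    by_cases h2 : PySem.Str.len (M.getD i "") = 1 <;>
      simp [h1, h2]

-- the main loops agree given the sliding-count invariant
theorem pvLoop_eq (M : List String) (k : Int) (hk : 0 ≤ k) :
    ∀ (c i : Nat) (D : PySem.Dict (List String) (List String)),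
      (((M.length : Int) - k) - (i : Int)).toNat = c →
      (PySem.List.pyRange (i : Int) ((M.length : Int) - k) 1).foldl (pvStepA M k) D
        = ((PySem.List.pyRange (i : Int) ((M.length : Int) - k) 1).foldl (pvStepB M k)
            (pvC M (i + k.toNat) - pvC M i, D)).2 := by
  intro c
  induction c with
  | zero =>
    intro i D h
    rw [PySem.List.pyRange_one_eq_nil (by omega)]
    simp
  | succ c ih =>
    intro i D h
    have hib : (i : Int) < (M.length : Int) - k := by omega
    rw [PySem.List.pyRange_one_cons hib, List.foldl_cons, List.foldl_cons]
    rw [pvStepA_eq M k hk i hib D, pvStepB_eq M k hk i _ D]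
    set b := pvC M (i + k.toNat) - pvC M i with hbdef
    set D' := if b = 0 then
        pvDictApp D ((M.drop i).take k.toNat) (PySem.List.pyGetD M ((i : Int) + k) "") else D
      with hD'
    have hilen : i < M.length := by omega
    have hiklen : i + k.toNat < M.length := by omega
    have hbad : b + (if pvBadP (M.getD (i + k.toNat) "") then 1 else 0)
        - (if pvBadP (M.getD i "") then 1 else 0)
        = pvC M ((i + 1) + k.toNat) - pvC M (i + 1) := by
      rw [List.getD_eq_getElem M "" hiklen, List.getD_eq_getElem M "" hilen]
      have e1 : (i + 1) + k.toNat = (i + k.toNat) + 1 := by omega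
      rw [e1, pvC_succ M (i + k.toNat) hiklen, pvC_succ M i hilen]
      ring
    rw [hbad]
    have hcast : (i : Int) + 1 = ((i + 1 : Nat) : Int) := by push_cast; ring
    rw [hcast]
    exact ih (i + 1) D' (by omega)

-- ===== VERDICT (by name: the statement is the Claim_ definition above) =====
theorem markov_model_spec : Claim_equal_markov_model := by
  intro wordList k _ hk
  have hk' : (0 : Int) ≤ k := hk
  unfold Spec_markov_model
  simp only [markov_model, markov_model_alt, pvM_eq]
  set M := pvBuildM wordList k with hM
  have h0 : PySem.List.slice M none (some k) = M.take k.toNat :=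
    PySem.List.slice_to M (b := k) (by omega)
  rw [h0, pvCountB]
  have hinit : (0 : Int) + ((M.take k.toNat).countP pvBadP : Int)
      = pvC M (0 + k.toNat) - pvC M 0 := by
    simp [pvC]
  rw [hinit]
  have hmain := pvLoop_eq M k hk' ((((M.length : Int) - k) - ((0 : Nat) : Int)).toNat) 0
    PySem.Dict.empty rfl
  simp only [Nat.cast_zero] at hmain
  rw [hmain]
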